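-- pv_equiv track=rewrite | github.com/heitorchang/learn-code | battles/tourneys/20170620_2030.py | largestDistance
-- ===== SOURCE A (Python) =====
-- from itertools import combinations
--
-- def dist(a, b):
--     return max(abs(a[0] - b[0]), abs(a[1] - b[1]))
--
-- def largestDistance(a):
--     pts = []
--     for i in range(0,len(a),2):
--         pts.append([a[i], a[i+1]])
--
--     pairs = combinations(pts, 2)
--     maxDist = 0
--     for c in pairs:
--         d = dist(c[0], c[1])
--         if d > maxDist:
--             maxDist = d
--     return maxDist
-- ===== SOURCE B (Python) =====
-- def largestDistance(a):
--     pts = []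
--     for i in range(0, len(a), 2):
--         pts.append([a[i], a[i + 1]])
--     if not pts:
--         return 0
--     minX = maxX = pts[0][0]
--     minY = maxY = pts[0][1]
--     for x, y in pts[1:]:
--         if x < minX:
--             minX = x
--         if x > maxX:
--             maxX = x
--         if y < minY:
--             minY = y
--         if y > maxY:
--             maxY = y
--     return max(maxX - minX, maxY - minY)
-- ===== Notes on version B (the rewrite author's own statement) =====
-- stated objective: faster
-- what changed: Replaces the all-pairs combinations scan of Chebyshev distances by a single pass tracking minX/maxX/minY/maxY and returning max(maxX-minX, maxY-minY).
import Mathlib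
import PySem

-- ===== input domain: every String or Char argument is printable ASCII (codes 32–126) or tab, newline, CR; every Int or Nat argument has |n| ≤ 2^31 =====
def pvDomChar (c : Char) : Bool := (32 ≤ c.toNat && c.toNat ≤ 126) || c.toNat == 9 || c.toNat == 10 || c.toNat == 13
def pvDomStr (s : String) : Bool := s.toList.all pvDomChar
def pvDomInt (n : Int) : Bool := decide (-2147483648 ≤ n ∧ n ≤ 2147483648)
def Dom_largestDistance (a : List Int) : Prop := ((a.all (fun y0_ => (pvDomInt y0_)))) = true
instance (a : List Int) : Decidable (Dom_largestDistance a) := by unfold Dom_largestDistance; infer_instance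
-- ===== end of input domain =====

-- B replaces A's O(n^2) all-pairs Chebyshev scan with one linear min/max pass (faster, asymptotic).


-- ===== PORT A =====
-- pts = []; for i in range(0, len(a), 2): pts.append([a[i], a[i+1]])
-- Pre_ guarantees every index is in range, so the .getD 0 default is never used
-- (on odd length Python raises IndexError, excluded by Pre_largestDistance).
def buildPts (a : List Int) : List (Int × Int) :=
  (PySem.List.pyRange 0 (a.length : Int) 2).foldl
    (fun pts i => pts ++ [((PySem.List.pyGet? a i).getD 0, (PySem.List.pyGet? a (i + 1)).getD 0)]) []

-- dist(a, b) = max(abs(a[0]-b[0]), abs(a[1]-b[1]))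
def chebDist (p q : Int × Int) : Int := max |p.1 - q.1| |p.2 - q.2|

-- inner part of the combinations loop: pairs whose first element is p
def innerFold (p : Int × Int) (rest : List (Int × Int)) (m : Int) : Int :=
  rest.foldl (fun acc q => if chebDist p q > acc then chebDist p q else acc) m

-- for c in combinations(pts, 2): d = dist(c[0], c[1]); if d > maxDist: maxDist = d
def pairsFold : List (Int × Int) → Int → Int
  | [], m => m
  | p :: rest, m => pairsFold rest (innerFold p rest m)

def largestDistance (a : List Int) : Int := pairsFold (buildPts a) 0

-- ===== PORT B =====
-- one step of B's min/max pass (the four 'if' updates)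
def mmStep (s : Int × Int × Int × Int) (p : Int × Int) : Int × Int × Int × Int :=
  (if p.1 < s.1 then p.1 else s.1,
   if p.1 > s.2.1 then p.1 else s.2.1,
   if p.2 < s.2.2.1 then p.2 else s.2.2.1,
   if p.2 > s.2.2.2 then p.2 else s.2.2.2)

def largestDistance_alt (a : List Int) : Int :=
  match buildPts a with
  | [] => 0
  | p :: rest =>
    let s := rest.foldl mmStep (p.1, p.1, p.2, p.2)
    max (s.2.1 - s.1) (s.2.2.2 - s.2.2.1)

-- ===== PRECONDITION & SPEC =====
-- Pre_ excludes odd-length inputs, on which A raises IndexError at a[i+1].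
def Pre_largestDistance (a : List Int) : Prop := a.length % 2 = 0
instance (a : List Int) : Decidable (Pre_largestDistance a) := by unfold Pre_largestDistance; infer_instance
def pvWitness_largestDistance : List Int := [1, 2, 3, 5, -1, 0]
def Spec_largestDistance (a : List Int) (out : Int) : Prop := out = largestDistance_alt a
instance (a : List Int) (out : Int) : Decidable (Spec_largestDistance a out) := by unfold Spec_largestDistance; infer_instance

-- ===== CLAIM (what is proved, stated in full; the proofs are below) =====
def Claim_equal_largestDistance : Prop := ∀ (a : List Int), Dom_largestDistance a → Pre_largestDistance a → Spec_largestDistance a (largestDistance a)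

-- ===== LEMMAS AND PROOFS =====

theorem le_innerFold (p : Int × Int) (rest : List (Int × Int)) (m : Int) :
    m ≤ innerFold p rest m := by
  induction rest generalizing m with
  | nil => simp [innerFold]
  | cons q t ih =>
    simp only [innerFold, List.foldl_cons] at *
    refine le_trans ?_ (ih _)
    split <;> omega

theorem le_pairsFold (pts : List (Int × Int)) (m : Int) : m ≤ pairsFold pts m := by
  induction pts generalizing m with
  | nil => simp [pairsFold]
  | cons p rest ih => exact le_trans (le_innerFold p rest m) (ih _)

theorem innerFold_le (p : Int × Int) (rest : List (Int × Int)) (m K : Int)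
    (hm : m ≤ K) (h : ∀ q ∈ rest, chebDist p q ≤ K) : innerFold p rest m ≤ K := by
  induction rest generalizing m with
  | nil => simpa [innerFold]
  | cons q t ih =>
    simp only [innerFold, List.foldl_cons] at *
    refine ih _ ?_ (fun r hr => h r (List.mem_cons_of_mem _ hr))
    have := h q (List.mem_cons_self ..)
    split <;> omega

theorem pairsFold_le (pts : List (Int × Int)) (m K : Int)
    (hm : m ≤ K) (h : ∀ p ∈ pts, ∀ q ∈ pts, chebDist p q ≤ K) : pairsFold pts m ≤ K := by
  induction pts generalizing m with
  | nil => simpa [pairsFold]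
  | cons p rest ih =>
    refine ih _ (innerFold_le p rest m K hm ?_) ?_
    · exact fun q hq => h p (by simp) q (by simp [hq])
    · exact fun x hx y hy => h x (by simp [hx]) y (by simp [hy])

theorem innerFold_ge (p q : Int × Int) (rest : List (Int × Int)) (m : Int)
    (hq : q ∈ rest) : chebDist p q ≤ innerFold p rest m := by
  induction rest generalizing m with
  | nil => cases hq
  | cons r t ih =>
    simp only [innerFold, List.foldl_cons]
    rcases List.mem_cons.mp hq with h | h
    · subst h
      refine le_trans ?_ (le_innerFold p t _)
      split <;> omega
    · exact ih _ h

theorem chebDist_comm (p q : Int × Int) : chebDist p q = chebDist q p := by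
  simp [chebDist, abs_sub_comm]

theorem pairsFold_ge_pair (pts : List (Int × Int)) (m : Int) (p q : Int × Int)
    (hp : p ∈ pts) (hq : q ∈ pts) (hne : p ≠ q) : chebDist p q ≤ pairsFold pts m := by
  induction pts generalizing m with
  | nil => cases hp
  | cons r rest ih =>
    simp only [pairsFold]
    rcases List.mem_cons.mp hp with hpr | hpr
    · subst hpr
      have hq' : q ∈ rest := by
        rcases List.mem_cons.mp hq with h | h
        · exact absurd h.symm hne
        · exact h
      exact le_trans (innerFold_ge p q rest m hq') (le_pairsFold _ _)
    · rcases List.mem_cons.mp hq with hqr | hqr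
      · subst hqr
        rw [chebDist_comm]
        exact le_trans (innerFold_ge q p rest m hpr) (le_pairsFold _ _)
      · exact ih _ hpr hqr

-- bounds of the min/max fold: it only widens the interval and covers all elements
theorem mm_bounds (rest : List (Int × Int)) (s0 : Int × Int × Int × Int) :
    (rest.foldl mmStep s0).1 ≤ s0.1 ∧ s0.2.1 ≤ (rest.foldl mmStep s0).2.1 ∧
    (rest.foldl mmStep s0).2.2.1 ≤ s0.2.2.1 ∧ s0.2.2.2 ≤ (rest.foldl mmStep s0).2.2.2 ∧
    ∀ p ∈ rest, (rest.foldl mmStep s0).1 ≤ p.1 ∧ p.1 ≤ (rest.foldl mmStep s0).2.1 ∧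
      (rest.foldl mmStep s0).2.2.1 ≤ p.2 ∧ p.2 ≤ (rest.foldl mmStep s0).2.2.2 := by
  induction rest generalizing s0 with
  | nil => simp
  | cons q t ih =>
    simp only [List.foldl_cons]
    obtain ⟨h1, h2, h3, h4, h5⟩ := ih (mmStep s0 q)
    have hs : (mmStep s0 q).1 ≤ s0.1 ∧ s0.2.1 ≤ (mmStep s0 q).2.1 ∧
        (mmStep s0 q).2.2.1 ≤ s0.2.2.1 ∧ s0.2.2.2 ≤ (mmStep s0 q).2.2.2 ∧
        (mmStep s0 q).1 ≤ q.1 ∧ q.1 ≤ (mmStep s0 q).2.1 ∧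
        (mmStep s0 q).2.2.1 ≤ q.2 ∧ q.2 ≤ (mmStep s0 q).2.2.2 := by
      simp only [mmStep]; split_ifs <;> omega
    refine ⟨by omega, by omega, by omega, by omega, fun p hp => ?_⟩
    rcases List.mem_cons.mp hp with h | h
    · subst h; exact ⟨by omega, by omega, by omega, by omega⟩
    · exact h5 p h

-- each extreme of the fold is attained by the seed or by some element of the list
theorem mm_attained (rest : List (Int × Int)) (s0 : Int × Int × Int × Int) :
    ((rest.foldl mmStep s0).1 = s0.1 ∨ ∃ p ∈ rest, (rest.foldl mmStep s0).1 = p.1) ∧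
    ((rest.foldl mmStep s0).2.1 = s0.2.1 ∨ ∃ p ∈ rest, (rest.foldl mmStep s0).2.1 = p.1) ∧
    ((rest.foldl mmStep s0).2.2.1 = s0.2.2.1 ∨ ∃ p ∈ rest, (rest.foldl mmStep s0).2.2.1 = p.2) ∧
    ((rest.foldl mmStep s0).2.2.2 = s0.2.2.2 ∨ ∃ p ∈ rest, (rest.foldl mmStep s0).2.2.2 = p.2) := by
  induction rest generalizing s0 with
  | nil => simp
  | cons q t ih =>
    simp only [List.foldl_cons]
    obtain ⟨h1, h2, h3, h4⟩ := ih (mmStep s0 q)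
    have e1 : (mmStep s0 q).1 = s0.1 ∨ (mmStep s0 q).1 = q.1 := by
      simp only [mmStep]; split_ifs <;> simp
    have e2 : (mmStep s0 q).2.1 = s0.2.1 ∨ (mmStep s0 q).2.1 = q.1 := by
      simp only [mmStep]; split_ifs <;> simp
    have e3 : (mmStep s0 q).2.2.1 = s0.2.2.1 ∨ (mmStep s0 q).2.2.1 = q.2 := by
      simp only [mmStep]; split_ifs <;> simp
    have e4 : (mmStep s0 q).2.2.2 = s0.2.2.2 ∨ (mmStep s0 q).2.2.2 = q.2 := by
      simp only [mmStep]; split_ifs <;> simp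
    refine ⟨?_, ?_, ?_, ?_⟩
    · rcases h1 with h | ⟨p, hp, h⟩
      · rcases e1 with e | e
        · exact Or.inl (h.trans e)
        · exact Or.inr ⟨q, by simp, h.trans e⟩
      · exact Or.inr ⟨p, by simp [hp], h⟩
    · rcases h2 with h | ⟨p, hp, h⟩
      · rcases e2 with e | e
        · exact Or.inl (h.trans e)
        · exact Or.inr ⟨q, by simp, h.trans e⟩
      · exact Or.inr ⟨p, by simp [hp], h⟩
    · rcases h3 with h | ⟨p, hp, h⟩
      · rcases e3 with e | e
        · exact Or.inl (h.trans e)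
        · exact Or.inr ⟨q, by simp, h.trans e⟩
      · exact Or.inr ⟨p, by simp [hp], h⟩
    · rcases h4 with h | ⟨p, hp, h⟩
      · rcases e4 with e | e
        · exact Or.inl (h.trans e)
        · exact Or.inr ⟨q, by simp, h.trans e⟩
      · exact Or.inr ⟨p, by simp [hp], h⟩

-- the heart of the equivalence, stated over an arbitrary point list
theorem pairsFold_eq_minmax (pts : List (Int × Int)) :
    pairsFold pts 0 =
      (match pts with
       | [] => 0
       | p :: rest =>
         let s := rest.foldl mmStep (p.1, p.1, p.2, p.2)
         max (s.2.1 - s.1) (s.2.2.2 - s.2.2.1)) := by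
  cases pts with
  | nil => rfl
  | cons p0 rest =>
    simp only []
    set s := rest.foldl mmStep (p0.1, p0.1, p0.2, p0.2) with hs
    obtain ⟨b1, b2, b3, b4, b5⟩ := mm_bounds rest (p0.1, p0.1, p0.2, p0.2)
    rw [← hs] at b1 b2 b3 b4 b5
    have hmem : ∀ r ∈ p0 :: rest, s.1 ≤ r.1 ∧ r.1 ≤ s.2.1 ∧ s.2.2.1 ≤ r.2 ∧ r.2 ≤ s.2.2.2 := by
      intro r hr
      rcases List.mem_cons.mp hr with h | h
      · subst h; exact ⟨b1, b2, b3, b4⟩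
      · exact b5 r h
    -- A ≤ B
    have hAB : pairsFold (p0 :: rest) 0 ≤ max (s.2.1 - s.1) (s.2.2.2 - s.2.2.1) := by
      refine pairsFold_le _ _ _ (by have := hmem p0 (by simp); omega) ?_
      intro p hp q hq
      have h1 := hmem p hp
      have h2 := hmem q hq
      have e1 : |p.1 - q.1| ≤ s.2.1 - s.1 := by rw [abs_le]; omega
      have e2 : |p.2 - q.2| ≤ s.2.2.2 - s.2.2.1 := by rw [abs_le]; omega
      simp only [chebDist]
      exact max_le_max e1 e2
    -- B ≤ A, via attained extremes
    obtain ⟨a1, a2, a3, a4⟩ := mm_attained rest (p0.1, p0.1, p0.2, p0.2)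
    rw [← hs] at a1 a2 a3 a4
    have hx1 : ∃ p ∈ p0 :: rest, s.1 = p.1 := by
      rcases a1 with h | ⟨p, hp, h⟩
      · exact ⟨p0, by simp, h⟩
      · exact ⟨p, by simp [hp], h⟩
    have hx2 : ∃ p ∈ p0 :: rest, s.2.1 = p.1 := by
      rcases a2 with h | ⟨p, hp, h⟩
      · exact ⟨p0, by simp, h⟩
      · exact ⟨p, by simp [hp], h⟩
    have hy1 : ∃ p ∈ p0 :: rest, s.2.2.1 = p.2 := by
      rcases a3 with h | ⟨p, hp, h⟩
      · exact ⟨p0, by simp, h⟩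
      · exact ⟨p, by simp [hp], h⟩
    have hy2 : ∃ p ∈ p0 :: rest, s.2.2.2 = p.2 := by
      rcases a4 with h | ⟨p, hp, h⟩
      · exact ⟨p0, by simp, h⟩
      · exact ⟨p, by simp [hp], h⟩
    have hxA : s.2.1 - s.1 ≤ pairsFold (p0 :: rest) 0 := by
      obtain ⟨pmin, hpmin, emin⟩ := hx1
      obtain ⟨pmax, hpmax, emax⟩ := hx2
      by_cases hne : pmax = pmin
      · subst hne
        rw [emin, emax]
        simpa using le_pairsFold (p0 :: rest) 0
      · have hcheb := pairsFold_ge_pair (p0 :: rest) 0 pmax pmin hpmax hpmin hne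
        have e : s.2.1 - s.1 ≤ |pmax.1 - pmin.1| := by
          rw [emin, emax]; exact le_abs_self _
        exact le_trans (le_trans e (le_max_left _ _)) hcheb
    have hyA : s.2.2.2 - s.2.2.1 ≤ pairsFold (p0 :: rest) 0 := by
      obtain ⟨pmin, hpmin, emin⟩ := hy1
      obtain ⟨pmax, hpmax, emax⟩ := hy2
      by_cases hne : pmax = pmin
      · subst hne
        rw [emin, emax]
        simpa using le_pairsFold (p0 :: rest) 0
      · have hcheb := pairsFold_ge_pair (p0 :: rest) 0 pmax pmin hpmax hpmin hne
        have e : s.2.2.2 - s.2.2.1 ≤ |pmax.2 - pmin.2| := by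
          rw [emin, emax]; exact le_abs_self _
        exact le_trans (le_trans e (le_max_right _ _)) hcheb
    exact le_antisymm hAB (max_le hxA hyA)

-- ===== VERDICT (by name: the statement is the Claim_ definition above) =====
theorem largestDistance_spec : Claim_equal_largestDistance := by
  intro a _ _
  unfold Spec_largestDistance largestDistance largestDistance_alt
  exact pairsFold_eq_minmax (buildPts a)
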